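-- pv_equiv track=rewrite | github.com/Arwa-Fawzy/Tic-Tac-Toe-game-with-6-search-algorithms | Game Code.py | BFS
-- ===== SOURCE A (Python) =====
-- computer_symbol = "O"
--
-- def BFS(initial_board, target_depth):
--     queue = [(initial_board, 0)]
--
--     while queue:
--         current_board, depth = queue.pop(0)
--         if depth == target_depth:
--             return current_board
--
--         empty_cells = [i for i, cell in enumerate(current_board) if cell == " "]
--         for cell in empty_cells:
--             next_board = current_board.copy()
--             next_board[cell] = computer_symbol
--             queue.append((next_board, depth + 1))
--
--     return None
-- ===== SOURCE B (Python) =====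
-- computer_symbol = "O"
--
-- def BFS(initial_board, target_depth):
--     # Single left-to-right pass: the first board BFS dequeues at target_depth
--     # is the one with the first target_depth empty cells filled with O.
--     if target_depth < 0:
--         return None
--     out = []
--     remaining = target_depth
--     for cell in initial_board:
--         if remaining > 0 and cell == " ":
--             out.append(computer_symbol)
--             remaining -= 1
--         else:
--             out.append(cell)
--     return out if remaining == 0 else None
-- ===== Notes on version B (the rewrite author's own statement) =====
-- stated objective: alternative
-- what changed: Replaces the breadth-first search that enqueues every order of filling empty cells with a single linear pass that fills the first target_depth empty cells (exactly the board the BFS dequeues first at that depth), returning None when target_depth is negative or exceeds the number of empty cells.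
import Mathlib
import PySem

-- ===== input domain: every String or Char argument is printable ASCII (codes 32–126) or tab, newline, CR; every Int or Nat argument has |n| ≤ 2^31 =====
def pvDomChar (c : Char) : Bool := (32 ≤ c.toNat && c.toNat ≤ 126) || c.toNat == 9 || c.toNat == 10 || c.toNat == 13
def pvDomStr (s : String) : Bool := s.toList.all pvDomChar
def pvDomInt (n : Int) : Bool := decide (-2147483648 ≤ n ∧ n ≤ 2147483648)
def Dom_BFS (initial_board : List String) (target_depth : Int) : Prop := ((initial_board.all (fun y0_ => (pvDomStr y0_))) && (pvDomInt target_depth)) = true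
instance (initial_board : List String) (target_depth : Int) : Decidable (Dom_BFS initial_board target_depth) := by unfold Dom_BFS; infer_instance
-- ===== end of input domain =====

-- B fills the first target_depth empty cells in one linear pass instead of A's
-- breadth-first enqueueing of every fill order; same return value everywhere.


-- ===== PORT A =====
-- [i for i, cell in enumerate(current_board) if cell == " "]
def pvEmpty (b : List String) : List Int :=
  ((PySem.List.enumerate b 0).filter (fun p => p.2 == " ")).map Prod.fst

-- spec-level copy of pvEmpty with Nat indices (used by the termination measure)
def pvENat : List String → List Nat
  | [] => []
  | c :: bs => if c = " " then 0 :: (pvENat bs).map (· + 1) else (pvENat bs).map (· + 1)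

theorem pvEmpty_shift (b : List String) : ∀ s : Int,
    ((PySem.List.enumerate b s).filter (fun p => p.2 == " ")).map Prod.fst
      = (pvENat b).map (fun n : Nat => (n : Int) + s) := by
  induction b with
  | nil => intro s; simp [PySem.List.enumerate_nil, pvENat]
  | cons c bs ih =>
    intro s
    rw [PySem.List.enumerate_cons]
    by_cases hc : c = " " <;>
      simp [hc, pvENat, ih (s+1), List.map_map, Function.comp] <;>
      · rintro a -; omega

theorem pvEmpty_eq (b : List String) : pvEmpty b = (pvENat b).map (fun n : Nat => (n : Int)) := by
  rw [pvEmpty, pvEmpty_shift b 0]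
  apply List.map_congr_left; intro n _; simp

theorem pvENat_len_set (b : List String) : ∀ n ∈ pvENat b,
    (pvENat (b.set n "O")).length = (pvENat b).length - 1 := by
  induction b with
  | nil => simp [pvENat]
  | cons c bs ih =>
    intro n hn
    by_cases hc : c = " "
    · rw [pvENat, if_pos hc] at hn
      rcases List.mem_cons.mp hn with h0 | hmem
      · subst h0; simp [hc, pvENat]
      · rcases List.mem_map.mp hmem with ⟨m, hm, rfl⟩
        have hne : (pvENat bs) ≠ [] := by intro h; rw [h] at hm; simp at hm
        have hlen : 1 ≤ (pvENat bs).length := by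
          cases h : pvENat bs with
          | nil => exact absurd h hne
          | cons x xs => simp
        simp [pvENat, hc, ih m hm]
        omega
    · rw [pvENat, if_neg hc] at hn
      rcases List.mem_map.mp hn with ⟨m, hm, rfl⟩
      simp [pvENat, hc, ih m hm]

def pvMeasure (Q : List (List String × Int)) : Nat :=
  (Q.map (fun p => Nat.factorial ((pvENat p.1).length + 1))).sum

theorem sum_map_const_of_mem {α : Type} (l : List α) (f : α → Nat) (c : Nat)
    (h : ∀ x ∈ l, f x = c) : (l.map f).sum = l.length * c := by
  induction l with
  | nil => simp
  | cons x xs ih =>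
    simp [h x (by simp), ih (fun y hy => h y (by simp [hy]))]
    ring

theorem pvChildren_eq (b : List String) (d : Int) :
    (pvEmpty b).map (fun i => (PySem.List.pySetD b i "O", d + 1))
      = (pvENat b).map (fun n => (b.set n "O", d + 1)) := by
  rw [pvEmpty_eq, List.map_map]
  apply List.map_congr_left; intro n _
  simp [Function.comp, PySem.List.pySetD_natCast]

theorem pvMeasure_step (b : List String) (d : Int) (rest : List (List String × Int)) :
    pvMeasure (rest ++ (pvEmpty b).map (fun i => (PySem.List.pySetD b i "O", d + 1)))
      < pvMeasure ((b, d) :: rest) := by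
  rw [pvChildren_eq]
  have hsplit : ∀ (Q R : List (List String × Int)), pvMeasure (Q ++ R) = pvMeasure Q + pvMeasure R := by
    intro Q R; simp [pvMeasure]
  have hcons : pvMeasure ((b, d) :: rest)
      = Nat.factorial ((pvENat b).length + 1) + pvMeasure rest := by
    simp [pvMeasure]
  rw [hsplit, hcons]
  have hC : pvMeasure ((pvENat b).map (fun n => (b.set n "O", d + 1)))
      < Nat.factorial ((pvENat b).length + 1) := by
    cases h : pvENat b with
    | nil => simp [pvMeasure]
    | cons n0 tl =>
      rw [← h]
      have hlen : 1 ≤ (pvENat b).length := by rw [h]; simp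
      have hsum : pvMeasure ((pvENat b).map (fun n => (b.set n "O", d + 1)))
          = (pvENat b).length * Nat.factorial ((pvENat b).length - 1 + 1) := by
        rw [pvMeasure, List.map_map]
        exact sum_map_const_of_mem (pvENat b) _ _
          (fun n hn => by simp [Function.comp, pvENat_len_set b n hn])
      rw [hsum]
      have he : (pvENat b).length - 1 + 1 = (pvENat b).length := by omega
      rw [he, Nat.factorial_succ]
      have hpos := Nat.factorial_pos (pvENat b).length
      have hlt : (pvENat b).length < (pvENat b).length + 1 := by omega
      exact Nat.mul_lt_mul_of_lt_of_le hlt (le_refl _) hpos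
  omega

-- the BFS loop of A: pop front, return at target depth, else append all children
def BFSloop (target : Int) (queue : List (List String × Int)) : Option (List String) :=
  match queue with
  | [] => none
  | (b, d) :: rest =>
    if d = target then some b
    else BFSloop target (rest ++ (pvEmpty b).map (fun i => (PySem.List.pySetD b i "O", d + 1)))
termination_by pvMeasure queue
decreasing_by exact pvMeasure_step _ _ _

def BFS (initial_board : List String) (target_depth : Int) : Option (List String) :=
  BFSloop target_depth [(initial_board, 0)]

-- ===== PORT B =====
-- the for-loop of Source B: copy cells, turning the first `remaining` empty ones into "O"
def pvFillLoop : List String → List String → Int → List String × Int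
  | out, [], rem => (out, rem)
  | out, cell :: rest, rem =>
    if 0 < rem ∧ cell = " " then pvFillLoop (out ++ ["O"]) rest (rem - 1)
    else pvFillLoop (out ++ [cell]) rest rem

def BFS_alt (initial_board : List String) (target_depth : Int) : Option (List String) :=
  if target_depth < 0 then none
  else
    let r := pvFillLoop [] initial_board target_depth
    if r.2 = 0 then some r.1 else none

-- ===== PRECONDITION & SPEC =====
def Spec_BFS (initial_board : List String) (target_depth : Int) (out : Option (List String)) : Prop := out = BFS_alt initial_board target_depth
instance (initial_board : List String) (target_depth : Int) (out : Option (List String)) : Decidable (Spec_BFS initial_board target_depth out) := by unfold Spec_BFS; infer_instance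

-- ===== CLAIM (what is proved, stated in full; the proofs are below) =====
def Claim_equal_BFS : Prop := ∀ (initial_board : List String) (target_depth : Int), Dom_BFS initial_board target_depth → Spec_BFS initial_board target_depth (BFS initial_board target_depth)

-- ===== LEMMAS AND PROOFS =====

-- gap to the target depth
def pvGap (t : Int) (p : List String × Int) : Int := t - p.2

-- does p still reach the target depth? (depth not past t, enough empty cells)
def pvCand (t : Int) (p : List String × Int) : Bool :=
  decide (p.2 ≤ t) && decide (t - p.2 ≤ ((pvENat p.1).length : Int))

-- first element of l with minimal gap
def pvPick (t : Int) : List (List String × Int) → Option (List String × Int)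
  | [] => none
  | x :: xs =>
    match pvPick t xs with
    | none => some x
    | some y => if pvGap t x ≤ pvGap t y then some x else some y

-- fill the first n empty cells with "O"
def pvFillN : Nat → List String → List String
  | 0, b => b
  | _ + 1, [] => []
  | n + 1, c :: bs => if c = " " then "O" :: pvFillN n bs else c :: pvFillN (n + 1) bs

-- the value of the BFS loop on an arbitrary queue
def pvF (t : Int) (Q : List (List String × Int)) : Option (List String) :=
  (pvPick t (Q.filter (pvCand t))).map (fun p => pvFillN (t - p.2).toNat p.1)

theorem pvPick_mem (t : Int) (l : List (List String × Int)) (y : List String × Int)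
    (h : pvPick t l = some y) : y ∈ l := by
  induction l with
  | nil => simp [pvPick] at h
  | cons x xs ih =>
    rw [pvPick] at h
    cases hp : pvPick t xs with
    | none => rw [hp] at h; simp at h; simp [h]
    | some z =>
      rw [hp] at h
      dsimp only at h
      by_cases hle : pvGap t x ≤ pvGap t z
      · rw [if_pos hle] at h; simp at h; simp [h]
      · rw [if_neg hle] at h; simp at h; subst h; exact List.mem_cons_of_mem _ (ih hp)

theorem pvPick_const (t : Int) (γ : Int) (l : List (List String × Int))
    (h : ∀ p ∈ l, pvGap t p = γ) : pvPick t l = l.head? := by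
  induction l with
  | nil => simp [pvPick]
  | cons x xs ih =>
    rw [pvPick, ih (fun p hp => h p (List.mem_cons_of_mem _ hp))]
    cases xs with
    | nil => simp
    | cons y ys =>
      simp only [List.head?]
      rw [if_pos]
      rw [h x (by simp), h y (by simp)]

theorem pvFillN_cons_not (c : String) (bs : List String) (n : Nat) (hc : c ≠ " ") :
    pvFillN n (c :: bs) = c :: pvFillN n bs := by
  cases n with
  | zero => simp [pvFillN]
  | succ k => rw [pvFillN, if_neg hc]

theorem pvFillN_set (b : List String) (n0 : Nat) (tl : List Nat)
    (h : pvENat b = n0 :: tl) : ∀ g : Nat, pvFillN (g + 1) b = pvFillN g (b.set n0 "O") := by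
  induction b generalizing n0 tl with
  | nil => simp [pvENat] at h
  | cons c bs ih =>
    intro g
    by_cases hc : c = " "
    · rw [pvENat, if_pos hc] at h
      have hn0 : n0 = 0 := by injection h with h1 _; omega
      subst hn0; subst hc
      rw [List.set_cons_zero]
      rw [pvFillN, if_pos rfl]
      rw [pvFillN_cons_not _ _ _ (by decide)]
    · rw [pvENat, if_neg hc] at h
      cases he : pvENat bs with
      | nil => rw [he] at h; simp at h
      | cons m0 tl' =>
        rw [he] at h
        simp only [List.map_cons] at h
        have hn0 : n0 = m0 + 1 := by injection h with h1 _; omega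
        subst hn0
        rw [List.set_cons_succ]
        rw [pvFillN_cons_not _ _ _ hc, pvFillN_cons_not _ _ _ hc, ih m0 tl' he g]

-- appending the (all-gap-(g-1)) children C after R: the pick is either an early
-- element of R with gap ≤ g-1, or the head of C
theorem pvPick_append_low (t : Int) (C : List (List String × Int)) (c0 : List String × Int)
    (g : Int) (hC : pvPick t C = some c0) (hg : pvGap t c0 = g - 1) :
    ∀ R : List (List String × Int), ∃ w, pvPick t (R ++ C) = some w ∧ pvGap t w ≤ g - 1 ∧
      ((pvPick t R = some w ∧ pvGap t w ≤ g - 1) ∨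
       (w = c0 ∧ ∀ z, pvPick t R = some z → g - 1 < pvGap t z)) := by
  intro R
  induction R with
  | nil =>
    refine ⟨c0, by simpa using hC, by omega, Or.inr ⟨rfl, by simp [pvPick]⟩⟩
  | cons r R' ih =>
    obtain ⟨w, hw, hwle, hcase⟩ := ih
    rw [List.cons_append, pvPick, hw]
    dsimp only
    by_cases hle : pvGap t r ≤ pvGap t w
    · refine ⟨r, by rw [if_pos hle], by linarith, Or.inl ⟨?_, by linarith⟩⟩
      rw [pvPick]
      rcases hcase with ⟨hR, _⟩ | ⟨rfl, hall⟩
      · rw [hR]; dsimp only; rw [if_pos hle]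
      · cases hp : pvPick t R' with
        | none => rfl
        | some z =>
          have := hall z hp
          dsimp only; rw [if_pos (by linarith)]
    · refine ⟨w, by rw [if_neg hle], hwle, ?_⟩
      push_neg at hle
      rcases hcase with ⟨hR, h2⟩ | ⟨rfl, hall⟩
      · refine Or.inl ⟨?_, h2⟩
        rw [pvPick, hR]; dsimp only; rw [if_neg (by linarith)]
      · refine Or.inr ⟨rfl, ?_⟩
        intro z hz
        rw [pvPick] at hz
        cases hp : pvPick t R' with
        | none =>
          rw [hp] at hz; dsimp only at hz
          injection hz with hzz; subst hzz; linarith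
        | some z' =>
          have hz' := hall z' hp
          rw [hp] at hz; dsimp only at hz
          split_ifs at hz with h3 <;> injection hz with hzz <;> subst hzz <;> linarith

theorem pvCand_children (t : Int) (b : List String) (d : Int) (hd : d ≠ t) :
    List.filter (pvCand t) ((pvENat b).map (fun n => (b.set n "O", d + 1))) =
      (if pvCand t (b, d) then (pvENat b).map (fun n => (b.set n "O", d + 1)) else []) := by
  split_ifs with hcand
  · apply List.filter_eq_self.mpr
    intro p hp
    rcases List.mem_map.mp hp with ⟨n, hn, rfl⟩
    have hlen := pvENat_len_set b n hn
    have hpos : 1 ≤ (pvENat b).length := by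
      cases h : pvENat b with
      | nil => rw [h] at hn; simp at hn
      | cons x xs => simp [h]
    simp only [pvCand, Bool.and_eq_true, decide_eq_true_eq] at hcand ⊢
    constructor <;> [skip; rw [hlen]] <;> omega
  · apply List.filter_eq_nil_iff.mpr
    intro p hp
    rcases List.mem_map.mp hp with ⟨n, hn, rfl⟩
    have hlen := pvENat_len_set b n hn
    have hpos : 1 ≤ (pvENat b).length := by
      cases h : pvENat b with
      | nil => rw [h] at hn; simp at hn
      | cons x xs => simp [h]
    simp only [pvCand, Bool.and_eq_true, decide_eq_true_eq] at hcand ⊢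
    intro hcon
    rcases hcon with ⟨h1, h2⟩
    rw [hlen] at h2
    exact hcand ⟨by omega, by omega⟩

theorem BFSloop_eq_pvF (t : Int) (queue : List (List String × Int)) :
    BFSloop t queue = pvF t queue := by
  induction queue using BFSloop.induct (target := t) with
  | case1 => simp [BFSloop, pvF, pvPick]
  | case2 b rest =>
    rw [BFSloop.eq_def]
    dsimp only
    rw [if_pos rfl]
    have hc : pvCand t (b, t) = true := by
      simp only [pvCand, Bool.and_eq_true, decide_eq_true_eq]
      constructor <;> omega
    rw [pvF, List.filter_cons_of_pos hc, pvPick]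
    cases hp : pvPick t (List.filter (pvCand t) rest) with
    | none =>
      dsimp only
      simp [pvFillN]
    | some y =>
      dsimp only
      have hy := pvPick_mem _ _ _ hp
      have hcy := (List.mem_filter.mp hy).2
      simp only [pvCand, Bool.and_eq_true, decide_eq_true_eq] at hcy
      rw [if_pos (by unfold pvGap; omega)]
      simp [pvFillN]
  | case3 b d rest hd ih =>
    rw [BFSloop.eq_def]
    dsimp only
    rw [if_neg hd, ih, pvF, pvF, List.filter_append, List.filter_cons, pvChildren_eq,
        pvCand_children t b d hd]
    by_cases hcand : pvCand t (b, d) = true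
    · rw [if_pos hcand, if_pos hcand]
      simp only [pvCand, Bool.and_eq_true, decide_eq_true_eq] at hcand
      have hpos : 1 ≤ (pvENat b).length := by
        rcases hcand with ⟨h1, h2⟩
        by_contra hcon
        have : (pvENat b).length = 0 := by omega
        rw [this] at h2
        simp at h2
        omega
      cases hEb : pvENat b with
      | nil => rw [hEb] at hpos; simp at hpos
      | cons n0 tl =>
        rw [← hEb]
        have hCpick : pvPick t ((pvENat b).map (fun n => (b.set n "O", d + 1)))
            = some (b.set n0 "O", d + 1) := by
          rw [pvPick_const t (t - (d + 1)) _ (by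
            intro p hp
            rcases List.mem_map.mp hp with ⟨n, _, rfl⟩
            rfl)]
          rw [hEb]; rfl
        obtain ⟨w, hw, hwle, hcase⟩ := pvPick_append_low t _ _ (t - d) hCpick
          (by unfold pvGap; ring) (List.filter (pvCand t) rest)
        rw [hw]
        have hfill : pvFillN (t - (d + 1)).toNat (b.set n0 "O") = pvFillN (t - d).toNat b := by
          have h1 := pvFillN_set b n0 tl hEb (t - d - 1).toNat
          have h2 : (t - d - 1).toNat + 1 = (t - d).toNat := by
            rcases hcand with ⟨ha, hb⟩; omega
          rw [h2] at h1
          rw [h1]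
          congr 1
          omega
        rcases hcase with ⟨hR, hle⟩ | ⟨rfl, hall⟩
        · rw [pvPick, hR]
          dsimp only
          rw [if_neg (by unfold pvGap at hle ⊢; omega)]
        · rw [pvPick]
          cases hp : pvPick t (List.filter (pvCand t) rest) with
          | none =>
            dsimp only
            simp only [Option.map_some]
            rw [hfill]
          | some z =>
            have := hall z hp
            dsimp only
            rw [if_pos (by unfold pvGap at this ⊢; omega)]
            simp only [Option.map_some]
            rw [hfill]
    · rw [if_neg hcand, if_neg hcand]
      rw [List.append_nil]

theorem pvFillLoop_spec : ∀ (bs out : List String) (r : Int), 0 ≤ r →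
    pvFillLoop out bs r = (out ++ pvFillN r.toNat bs, r - min r ((pvENat bs).length : Int)) := by
  intro bs
  induction bs with
  | nil =>
    intro out r hr
    rw [pvFillLoop]
    have h0 : pvFillN r.toNat [] = [] := by
      cases h : r.toNat <;> rfl
    rw [h0]
    simp only [pvENat, List.length_nil, Nat.cast_zero, List.append_nil]
    rw [Prod.mk.injEq]
    refine ⟨rfl, ?_⟩
    simp only [Int.min_def]
    split_ifs <;> omega
  | cons c bs ih =>
    intro out r hr
    rw [pvFillLoop]
    by_cases hcase : 0 < r ∧ c = " "
    · rw [if_pos hcase]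
      rcases hcase with ⟨hrpos, hc⟩
      rw [ih _ (r - 1) (by omega)]
      have ht : r.toNat = (r - 1).toNat + 1 := by omega
      rw [ht]
      subst hc
      rw [pvFillN, if_pos rfl]
      rw [Prod.mk.injEq]
      constructor
      · simp
      · simp [pvENat]
        push_cast
        simp only [Int.min_def]
        split_ifs <;> omega
    · rw [if_neg hcase]
      rw [ih _ r hr]
      by_cases hc : c = " "
      · have hr0 : r = 0 := by
          by_contra hcon
          exact hcase ⟨by omega, hc⟩
        subst hr0
        subst hc
        rw [Prod.mk.injEq]
        constructor
        · simp [pvFillN]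
        · simp only [Int.min_def]
          split_ifs <;> omega
      · rw [pvFillN_cons_not _ _ _ hc]
        rw [Prod.mk.injEq]
        constructor
        · simp
        · simp only [pvENat, if_neg hc, List.length_map]

theorem BFS_alt_eq (init : List String) (t : Int) :
    BFS_alt init t =
      (if 0 ≤ t ∧ t ≤ ((pvENat init).length : Int) then some (pvFillN t.toNat init) else none) := by
  rw [BFS_alt]
  by_cases ht : t < 0
  · rw [if_pos ht, if_neg (by omega)]
  · rw [if_neg ht]
    have h := pvFillLoop_spec init [] t (by omega)
    simp only [h, List.nil_append]
    by_cases hle : t ≤ ((pvENat init).length : Int)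
    · rw [if_pos (by simp only [Int.min_def]; split_ifs <;> omega)]
      rw [if_pos (by constructor <;> omega)]
    · rw [if_neg (by simp only [Int.min_def]; split_ifs <;> omega)]
      rw [if_neg (by omega)]

-- ===== VERDICT (by name: the statement is the Claim_ definition above) =====
theorem BFS_spec : Claim_equal_BFS := by
  intro init t _
  unfold Spec_BFS
  rw [BFS, BFSloop_eq_pvF, BFS_alt_eq, pvF]
  by_cases hc : pvCand t (init, 0) = true
  · rw [List.filter_cons_of_pos hc]
    simp only [List.filter_nil, pvPick, Option.map_some]
    simp only [pvCand, Bool.and_eq_true, decide_eq_true_eq] at hc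
    rw [if_pos (by constructor <;> omega)]
    norm_num
  · rw [List.filter_cons_of_neg (by simpa using hc)]
    simp only [List.filter_nil, pvPick, Option.map_none]
    simp only [pvCand, Bool.and_eq_true, decide_eq_true_eq] at hc
    have hneg : ¬(0 ≤ t ∧ t ≤ ((pvENat init).length : Int)) := by
      intro h
      exact hc ⟨by omega, by omega⟩
    rw [if_neg hneg]
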